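-- pv_equiv track=rewrite | github.com/revanthavs/morningproblems | Downloads/preprocess/preprocess.py | lowercasewords
-- ===== SOURCE A (Python) =====
-- def lowercasewords(word_list):
--     """
--     Converts all Uppercase letters in the given list of words into Lowercase
--
--     Arguments (List): Address of list of words to process
--
--     Returns (List): Address of new list created
--     """
--     word_list1 = []
--     for i in range(len(word_list)):
--         string = ""
--         for j in range(len(word_list[i])):
--             asci = ord(word_list[i][j])
--             if asci >= 65 and asci <= 90:
--                 # Converts to lower case since ascii value of letter is
--                 # between 65 to 90 are Upper case letters
--                 string += chr(asci + 32)
--             else: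
--                 string += word_list[i][j]
--         word_list1.append(string)
--     return (word_list1)
-- ===== SOURCE B (Python) =====
-- _TABLE = str.maketrans("ABCDEFGHIJKLMNOPQRSTUVWXYZ", "abcdefghijklmnopqrstuvwxyz")
--
-- def lowercasewords(word_list):
--     """
--     Converts all Uppercase letters in the given list of words into Lowercase
--     """
--     return [w.translate(_TABLE) for w in word_list]
-- ===== Notes on version B (the rewrite author's own statement) =====
-- stated objective: idiomatic
-- what changed: Replaces the index-driven double loop with per-character ord/chr arithmetic and quadratic string concatenation by a precomputed str.maketrans A-Z table applied with str.translate in a list comprehension.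
import Mathlib
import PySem

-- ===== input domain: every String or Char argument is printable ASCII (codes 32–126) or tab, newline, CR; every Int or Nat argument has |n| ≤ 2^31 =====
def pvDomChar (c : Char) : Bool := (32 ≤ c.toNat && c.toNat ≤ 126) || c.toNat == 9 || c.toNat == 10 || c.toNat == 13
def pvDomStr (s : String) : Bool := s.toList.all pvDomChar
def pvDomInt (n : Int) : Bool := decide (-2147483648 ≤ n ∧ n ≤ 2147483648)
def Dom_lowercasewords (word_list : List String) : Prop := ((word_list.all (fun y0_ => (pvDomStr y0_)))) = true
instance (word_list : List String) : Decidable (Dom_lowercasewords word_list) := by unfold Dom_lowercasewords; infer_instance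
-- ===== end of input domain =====

-- B replaces A's index-driven double loop with per-character ord/chr arithmetic by a
-- precomputed str.maketrans A..Z→a..z table applied with str.translate in a list
-- comprehension (idiomatic; same asymptotic cost).

-- ===== PORT A =====
-- string building ('string += c') is ported on the List Char side (str ++ [c]); exact
def lowercasewords (word_list : List String) : List String :=
  (PySem.List.pyRange 0 (PySem.List.len word_list) 1).foldl (fun word_list1 i =>
    let w := PySem.List.pyGetD word_list i ""
    let s := (PySem.List.pyRange 0 (PySem.Str.len w) 1).foldl (fun string j =>
      let c := PySem.List.pyGetD w.toList j ' '
      let asci : Int := (c.toNat : Int)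
      if asci ≥ 65 ∧ asci ≤ 90 then string ++ [Char.ofNat (asci + 32).toNat]
      else string ++ [c]) ([] : List Char)
    word_list1 ++ [String.ofList s]) []

-- ===== PORT B =====
-- _TABLE = str.maketrans("ABC…Z", "abc…z"): an ordinal→ordinal mapping, ported as the
-- zipped association list of the two literal strings' code points
def lcTable : List (Int × Int) :=
  (List.zip "ABCDEFGHIJKLMNOPQRSTUVWXYZ".toList "abcdefghijklmnopqrstuvwxyz".toList).map
    (fun p => ((p.1.toNat : Int), (p.2.toNat : Int)))

-- dict lookup (first match), hand-ported: exact for a table with distinct keys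
def tblGet : List (Int × Int) → Int → Option Int
  | [], _ => none
  | (k, v) :: t, m => if m = k then some v else tblGet t m

-- w.translate(_TABLE): each char's ordinal is looked up; hits map to chr(v), misses stay
def pyTranslate (w : String) : String :=
  String.ofList (w.toList.map (fun c =>
    match tblGet lcTable (c.toNat : Int) with
    | some v => Char.ofNat v.toNat
    | none => c))

def lowercasewords_alt (word_list : List String) : List String :=
  word_list.map pyTranslate

-- ===== PRECONDITION & SPEC =====
def Spec_lowercasewords (word_list : List String) (out : List String) : Prop := out = lowercasewords_alt word_list
instance (word_list : List String) (out : List String) : Decidable (Spec_lowercasewords word_list out) := by unfold Spec_lowercasewords; infer_instance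

-- ===== CLAIM (what is proved, stated in full; the proofs are below) =====
def Claim_equal_lowercasewords : Prop := ∀ (word_list : List String), Dom_lowercasewords word_list → Spec_lowercasewords word_list (lowercasewords word_list)

-- ===== LEMMAS AND PROOFS =====

lemma tblGet_none (t : List (Int × Int)) (m : Int) (h : ∀ p ∈ t, p.1 ≠ m) :
    tblGet t m = none := by
  induction t with
  | nil => rfl
  | cons p t ih =>
    obtain ⟨k, v⟩ := p
    rw [tblGet, if_neg (fun e => h (k, v) List.mem_cons_self (by simpa using e.symm))]
    exact ih fun q hq => h q (List.mem_cons_of_mem _ hq)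

-- the translation table, characterised
lemma tbl (m : Int) :
    tblGet lcTable m = if 65 ≤ m ∧ m < 91 then some (m + 32) else none := by
  by_cases h : 65 ≤ m ∧ m < 91
  · rw [if_pos h]
    obtain ⟨h1, h2⟩ := h
    interval_cases m <;> rfl
  · rw [if_neg h]
    refine tblGet_none _ _ fun p hp => ?_
    have hb : 65 ≤ p.1 ∧ p.1 < 91 := by revert hp; revert p; decide
    omega

-- the per-character map of B equals A's branch
lemma char_eq (c : Char) :
    (match tblGet lcTable ((c.toNat : Int)) with
     | some v => Char.ofNat v.toNat
     | none => c)
    = if ((c.toNat : Int) ≥ 65 ∧ (c.toNat : Int) ≤ 90)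
      then Char.ofNat (((c.toNat : Int)) + 32).toNat else c := by
  rw [tbl]
  by_cases h : 65 ≤ (c.toNat : Int) ∧ (c.toNat : Int) < 91
  · rw [if_pos h, if_pos (by omega)]
  · rw [if_neg h, if_neg (by omega)]

-- A's inner loop builds exactly the charwise map
lemma inner_loop (cs : List Char) (acc : List Char) :
    cs.foldl (fun string c =>
      if ((c.toNat : Int) ≥ 65 ∧ (c.toNat : Int) ≤ 90)
      then string ++ [Char.ofNat (((c.toNat : Int)) + 32).toNat]
      else string ++ [c]) acc
    = acc ++ cs.map (fun c =>
        if ((c.toNat : Int) ≥ 65 ∧ (c.toNat : Int) ≤ 90)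
        then Char.ofNat (((c.toNat : Int)) + 32).toNat else c) := by
  induction cs generalizing acc with
  | nil => simp
  | cons c cs ih =>
    simp only [List.foldl_cons, List.map_cons, ih]
    by_cases h : ((c.toNat : Int) ≥ 65 ∧ (c.toNat : Int) ≤ 90)
    · rw [if_pos h, if_pos h]; simp
    · rw [if_neg h, if_neg h]; simp

-- A's word-level result, as a map
lemma word_eq (w : String) :
    String.ofList ((PySem.List.pyRange 0 (PySem.Str.len w) 1).foldl (fun string j =>
      let c := PySem.List.pyGetD w.toList j ' '
      let asci : Int := (c.toNat : Int)
      if asci ≥ 65 ∧ asci ≤ 90 then string ++ [Char.ofNat (asci + 32).toNat]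
      else string ++ [c]) ([] : List Char))
    = pyTranslate w := by
  have hlen : PySem.Str.len w = PySem.List.len w.toList := by
    simp [PySem.Str.len_eq]
  rw [hlen]
  have hfold := PySem.List.foldl_pyRange_zero_pyGetD (xs := w.toList) (d := ' ')
    (f := fun string c =>
      if ((c.toNat : Int) ≥ 65 ∧ (c.toNat : Int) ≤ 90)
      then string ++ [Char.ofNat (((c.toNat : Int)) + 32).toNat]
      else string ++ [c]) (init := ([] : List Char))
  rw [hfold, inner_loop]
  simp only [List.nil_append]
  exact congrArg String.ofList (List.map_congr_left fun c _ => (char_eq c).symm)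

-- ===== VERDICT (by name: the statement is the Claim_ definition above) =====
theorem lowercasewords_spec : Claim_equal_lowercasewords := by
  intro word_list _
  unfold Spec_lowercasewords lowercasewords lowercasewords_alt
  refine Eq.trans (PySem.List.foldl_pyRange_zero_pyGetD (xs := word_list) (d := "")
    (f := fun word_list1 w =>
      word_list1 ++ [String.ofList ((PySem.List.pyRange 0 (PySem.Str.len w) 1).foldl (fun string j =>
        let c := PySem.List.pyGetD w.toList j ' '
        let asci : Int := (c.toNat : Int)
        if asci ≥ 65 ∧ asci ≤ 90 then string ++ [Char.ofNat (asci + 32).toNat]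
        else string ++ [c]) ([] : List Char))])
    (init := [])) ?_
  refine Eq.trans (PySem.List.foldl_append_singleton_eq_map (l := word_list)
    (f := fun w =>
      String.ofList ((PySem.List.pyRange 0 (PySem.Str.len w) 1).foldl (fun string j =>
        let c := PySem.List.pyGetD w.toList j ' '
        let asci : Int := (c.toNat : Int)
        if asci ≥ 65 ∧ asci ≤ 90 then string ++ [Char.ofNat (asci + 32).toNat]
        else string ++ [c]) ([] : List Char)))
    (acc := [])) ?_
  simp only [List.nil_append]
  exact List.map_congr_left fun w _ => word_eq w
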